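-- pv_equiv track=rewrite | github.com/RedFantom/gsf-discord-bot | bot/strings.py | build_upgrade_string
-- ===== SOURCE A (Python) =====
-- UPGRADE_STR = {
--     "R": "Right",
--     "L": "Left"
-- }
--
-- def build_upgrade_string(upgrade_str: str):
--     """
--     Build a human-readable string showing upgrades from an upgrade str
--
--     123RL -> (Right, Left)
--     123LR -> (Left, Right)
--     123R -> (Right, None)
--     123 -> (Level 3)
--     12L -> (Left)
--     """
--     string = str()
--     if len(upgrade_str) == 0:
--         return "(No upgrades)"
--     t_choice = None
--     for upgrade in upgrade_str:
--         if upgrade.isdigit():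
--             string = "(Level {})".format(upgrade)
--             continue
--         upgrade = UPGRADE_STR[upgrade]
--         if t_choice is None:
--             string = "({})".format(upgrade)
--             t_choice = upgrade
--         else:
--             string = "({}, {})".format(t_choice, upgrade)
--     return string
-- ===== SOURCE B (Python) =====
-- UPGRADE_STR = {
--     "R": "Right",
--     "L": "Left"
-- }
--
-- def build_upgrade_string(upgrade_str: str):
--     """Validate-then-direct-compute: the result depends only on the last
--     character and the first letter, so compute it directly instead of
--     rebuilding the string on every loop iteration."""
--     if not upgrade_str:
--         return "(No upgrades)"
--     letters = [UPGRADE_STR[c] for c in upgrade_str if not c.isdigit()]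
--     last = upgrade_str[-1]
--     if last.isdigit():
--         return "(Level {})".format(last)
--     if len(letters) == 1:
--         return "({})".format(letters[0])
--     return "({}, {})".format(letters[0], letters[-1])
-- ===== Notes on version B (the rewrite author's own statement) =====
-- stated objective: simpler
-- what changed: A rebuilds the whole result string on every loop iteration (overwrite-per-character with a t_choice flag); B validates/maps the letters in one comprehension and then computes the result directly from the last character and the first/last letter, with no running string state.
import Mathlib
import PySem

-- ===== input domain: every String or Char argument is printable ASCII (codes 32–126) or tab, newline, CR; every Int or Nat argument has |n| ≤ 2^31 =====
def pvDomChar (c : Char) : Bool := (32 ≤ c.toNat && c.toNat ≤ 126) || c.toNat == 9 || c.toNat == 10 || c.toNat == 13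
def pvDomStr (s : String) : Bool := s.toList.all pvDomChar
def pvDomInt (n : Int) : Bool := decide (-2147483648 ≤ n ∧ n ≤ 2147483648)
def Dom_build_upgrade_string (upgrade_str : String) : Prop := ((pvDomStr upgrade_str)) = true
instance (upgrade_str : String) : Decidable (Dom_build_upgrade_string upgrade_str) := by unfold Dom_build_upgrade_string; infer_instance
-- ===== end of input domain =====

-- B replaces A's overwrite-the-result-every-iteration loop by one validate/map pass
-- plus a direct computation from the last character and the first/last letter (simpler).
-- On inputs with a non-digit character that has no UPGRADE_STR entry Python A raises KeyError;
-- Pre_ excludes exactly those inputs.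


-- module constant UPGRADE_STR (shared by both ports, as in the Python module)
def UPGRADE_STR : PySem.Dict Char String := PySem.Dict.ofList [('R', "Right"), ('L', "Left")]

-- ===== PORT A =====
-- loop body of A: state = (string, t_choice).  UPGRADE_STR[c] is KeyError for an
-- unmapped non-digit char; the getD "" default is only reachable outside Pre_.
def stepA (st : String × Option String) (c : Char) : String × Option String :=
  if PySem.Chars.isdigit c then
    ("(Level " ++ String.ofList [c] ++ ")", st.2)
  else
    let u := UPGRADE_STR.getD c ""
    match st.2 with
    | none => ("(" ++ u ++ ")", some u)
    | some t => ("(" ++ t ++ ", " ++ u ++ ")", some t)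

def build_upgrade_string (upgrade_str : String) : String :=
  if PySem.Str.len upgrade_str = 0 then "(No upgrades)"
  else (upgrade_str.toList.foldl stepA ("", none)).1

-- ===== PORT B =====
-- body of Source B after the empty guard (cs nonempty)
def altBody (cs : List Char) : String :=
  let letters := (cs.filter (fun c => !(PySem.Chars.isdigit c))).map (fun c => UPGRADE_STR.getD c "")
  let last := PySem.List.pyGetD cs (-1) ' '
  if PySem.Chars.isdigit last then
    "(Level " ++ String.ofList [last] ++ ")"
  else if letters.length = 1 then
    "(" ++ PySem.List.pyGetD letters 0 "" ++ ")"
  else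
    "(" ++ PySem.List.pyGetD letters 0 "" ++ ", " ++ PySem.List.pyGetD letters (-1) "" ++ ")"

def build_upgrade_string_alt (upgrade_str : String) : String :=
  if upgrade_str.toList.isEmpty then "(No upgrades)"
  else altBody upgrade_str.toList

-- ===== PRECONDITION & SPEC =====
-- Pre_ excludes exactly the inputs on which Python A raises KeyError: those with a
-- non-digit character with no UPGRADE_STR entry.
def Pre_build_upgrade_string (upgrade_str : String) : Prop :=
  upgrade_str.toList.all (fun c => PySem.Chars.isdigit c || c == 'R' || c == 'L') = true
instance (upgrade_str : String) : Decidable (Pre_build_upgrade_string upgrade_str) := by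
  unfold Pre_build_upgrade_string; infer_instance

def pvWitness_build_upgrade_string : String := "12L"

def Spec_build_upgrade_string (upgrade_str : String) (out : String) : Prop := out = build_upgrade_string_alt upgrade_str
instance (upgrade_str : String) (out : String) : Decidable (Spec_build_upgrade_string upgrade_str out) := by unfold Spec_build_upgrade_string; infer_instance

-- ===== CLAIM (what is proved, stated in full; the proofs are below) =====
def Claim_equal_build_upgrade_string : Prop := ∀ (upgrade_str : String), Dom_build_upgrade_string upgrade_str → Pre_build_upgrade_string upgrade_str → Spec_build_upgrade_string upgrade_str (build_upgrade_string upgrade_str)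

-- ===== LEMMAS AND PROOFS =====

-- one step of A from the not-yet-chosen state, digit resp. letter
theorem stepA_none_digit (str : String) (c : Char) (h : PySem.Chars.isdigit c = true) :
    stepA (str, none) c = ("(Level " ++ String.ofList [c] ++ ")", none) := by
  simp [stepA, h]

theorem stepA_none_letter (str : String) (c : Char) (h : PySem.Chars.isdigit c = false) :
    stepA (str, none) c = ("(" ++ UPGRADE_STR.getD c "" ++ ")", some (UPGRADE_STR.getD c "")) := by
  simp [stepA, h]

-- xs[-1] facts in the two list shapes the induction produces
theorem pyGetD_singleton_neg_one (x : Char) : PySem.List.pyGetD [x] (-1) ' ' = x := rfl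

theorem pyGetD_cons_append_neg_one {α : Type} (a : α) (l : List α) (x d : α) :
    PySem.List.pyGetD (a :: (l ++ [x])) (-1) d = x :=
  PySem.List.pyGetD_neg_one_append_singleton (a :: l) x d

-- once t_choice is set it never changes
theorem stepA_snd_some (cs : List Char) (str t0 : String) :
    (cs.foldl stepA (str, some t0)).2 = some t0 := by
  induction cs generalizing str with
  | nil => rfl
  | cons c rest ih =>
    simp only [List.foldl_cons, stepA]
    split
    · exact ih _
    · exact ih _

-- with t_choice set, the final string depends only on t_choice and the last char
theorem foldl_some_last (cs : List Char) (x : Char) (str t0 : String) :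
    ((cs ++ [x]).foldl stepA (str, some t0)).1 =
      (if PySem.Chars.isdigit x then "(Level " ++ String.ofList [x] ++ ")"
       else "(" ++ t0 ++ ", " ++ UPGRADE_STR.getD x "" ++ ")") := by
  rw [List.foldl_append]
  rw [show cs.foldl stepA (str, some t0) = ((cs.foldl stepA (str, some t0)).1, some t0) from
        Prod.ext rfl (stepA_snd_some cs str t0)]
  simp only [List.foldl_cons, List.foldl_nil, stepA]
  split <;> rfl

-- a digit at the head drops out of B's body (last char and letters are unchanged)
theorem altBody_cons_digit (c : Char) (l : List Char) (x : Char)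
    (hc : PySem.Chars.isdigit c = true) :
    altBody (c :: (l ++ [x])) = altBody (l ++ [x]) := by
  simp only [altBody, pyGetD_cons_append_neg_one,
    PySem.List.pyGetD_neg_one_append_singleton, List.filter_cons, hc, Bool.not_true,
    Bool.false_eq_true, if_false]

-- main loop lemma: A's fold from the initial (str, none) state equals B's body
theorem foldl_none_eq_altBody (cs : List Char) (x : Char) (str : String) :
    ((cs ++ [x]).foldl stepA (str, none)).1 = altBody (cs ++ [x]) := by
  induction cs generalizing str with
  | nil =>
    simp only [List.nil_append, List.foldl_cons, List.foldl_nil]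
    cases hx : PySem.Chars.isdigit x with
    | true =>
      rw [stepA_none_digit str x hx]
      simp [altBody, pyGetD_singleton_neg_one, hx]
    | false =>
      rw [stepA_none_letter str x hx]
      simp [altBody, pyGetD_singleton_neg_one, hx, PySem.List.pyGetD_zero_cons]
  | cons c rest ih =>
    simp only [List.cons_append, List.foldl_cons]
    cases hc : PySem.Chars.isdigit c with
    | true =>
      rw [stepA_none_digit str c hc, ih, altBody_cons_digit c rest x hc]
    | false =>
      rw [stepA_none_letter str c hc, foldl_some_last]
      simp only [altBody, pyGetD_cons_append_neg_one _ _ _ _, List.filter_cons, hc,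
        Bool.not_false, if_true, List.map_cons]
      cases hx : PySem.Chars.isdigit x with
      | true => simp
      | false =>
        simp [hx, pyGetD_cons_append_neg_one, PySem.List.pyGetD_zero_cons]

-- ===== VERDICT (by name: the statement is the Claim_ definition above) =====
theorem build_upgrade_string_spec : Claim_equal_build_upgrade_string := by
  intro s _ _
  unfold Spec_build_upgrade_string build_upgrade_string build_upgrade_string_alt
  rcases List.eq_nil_or_concat s.toList with h | ⟨l, x, h⟩
  · simp [PySem.Str.len, h]
  · rw [List.concat_eq_append] at h
    rw [h, if_neg (by simp [PySem.Str.len, h]; omega), if_neg (by simp)]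
    exact foldl_none_eq_altBody l x ""
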